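-- pv_equiv track=rewrite | github.com/ShuvalovAnthony/ez_python | Polina/23/76238.py | f
-- ===== SOURCE A (Python) =====
-- def f(start, stop, can_add_2=True):
--     if start > stop: return 0
--     if start == stop: return 1
--
--     moves = [
--         f(start + 1, stop, True),
--         f(start*2, stop, True)
--     ]
--
--     if can_add_2:
--         moves.append(f(start + 2, stop, False))
--
--     return sum(moves)
-- ===== SOURCE B (Python) =====
-- def f(start, stop, can_add_2=True):
--     # Bottom-up DP over positions start..stop (index i = start + i): two tables,
--     # one per state of the +2 flag, filled from stop down to start.
--     if start > stop:
--         return 0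
--     n = stop - start
--     dp_t = [0] * (n + 1)   # ways with the +2 move available
--     dp_f = [0] * (n + 1)   # ways with the +2 move spent
--     dp_t[n] = 1
--     dp_f[n] = 1
--     for i in range(n - 1, -1, -1):
--         s = start + i
--         d = 2 * s - start                      # index of position 2*s
--         base = dp_t[i + 1] + (dp_t[d] if d <= n else 0)
--         dp_f[i] = base
--         dp_t[i] = base + (dp_f[i + 2] if i + 2 <= n else 0)
--     return dp_t[0] if can_add_2 else dp_f[0]
-- ===== Notes on version B (the rewrite author's own statement) =====
-- stated objective: alternative
-- what changed: Replaces A's three-way branching recursion with a bottom-up dynamic program over two arrays indexed by position (one per state of the +2 flag), filled from stop down to start.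
import Mathlib
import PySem

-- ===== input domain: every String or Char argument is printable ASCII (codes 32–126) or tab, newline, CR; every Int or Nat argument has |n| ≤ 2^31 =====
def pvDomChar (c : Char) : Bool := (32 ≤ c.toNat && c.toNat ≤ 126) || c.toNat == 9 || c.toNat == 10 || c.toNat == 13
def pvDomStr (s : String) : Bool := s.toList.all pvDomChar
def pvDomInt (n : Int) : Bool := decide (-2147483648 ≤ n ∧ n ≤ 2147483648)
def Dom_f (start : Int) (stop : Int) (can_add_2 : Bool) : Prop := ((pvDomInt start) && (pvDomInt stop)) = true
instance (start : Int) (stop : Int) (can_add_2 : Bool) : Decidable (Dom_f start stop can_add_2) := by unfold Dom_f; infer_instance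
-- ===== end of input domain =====

-- B replaces A's three-way branching recursion by a bottom-up dynamic program over two
-- arrays (one per state of the +2 flag), filled from stop down to start.

-- ===== PORT A =====
-- A's recursion, with fuel (stop-start).toNat+1: on every input satisfying Pre_f the fuel
-- is never exhausted (each recursive call strictly shrinks stop-start there), so this is
-- exactly A's computation; where Python A recurses forever (start ≤ 0 < stop) Pre_f excludes.
def fAux : Nat → Int → Int → Bool → Int
  | 0, _, _, _ => 0
  | fuel+1, start, stop, can_add_2 =>
    if start > stop then 0
    else if start = stop then 1
    else
      let moves := [fAux fuel (start + 1) stop true, fAux fuel (start * 2) stop true]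
      let moves := if can_add_2 then moves ++ [fAux fuel (start + 2) stop false] else moves
      moves.sum

def f (start : Int) (stop : Int) (can_add_2 : Bool) : Int :=
  fAux ((stop - start).toNat + 1) start stop can_add_2

-- ===== PORT B =====
-- the body of Source B's for-loop (dp_t, dp_f are the two lists; i the loop index).
-- List indices are read with List.getD; under Pre_f every index read is nonnegative and
-- in range, where this is exact Python indexing.
def bStep (start : Int) (n : Nat) (st : List Int × List Int) (i : Int) : List Int × List Int :=
  let s := start + i
  let d := 2 * s - start
  let base := st.1.getD (i + 1).toNat 0 + (if d ≤ (n : Int) then st.1.getD d.toNat 0 else 0)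
  let dpf' := st.2.set i.toNat base
  let dpt' := st.1.set i.toNat (base + (if i + 2 ≤ (n : Int) then dpf'.getD (i + 2).toNat 0 else 0))
  (dpt', dpf')

def f_alt (start : Int) (stop : Int) (can_add_2 : Bool) : Int :=
  if start > stop then 0
  else
    let n : Nat := (stop - start).toNat
    let dpt := (List.replicate (n + 1) (0 : Int)).set n 1
    let dpf := (List.replicate (n + 1) (0 : Int)).set n 1
    let st := (PySem.List.pyRange ((n : Int) - 1) (-1) (-1)).foldl (bStep start n) (dpt, dpf)
    if can_add_2 then st.1.getD 0 0 else st.2.getD 0 0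

-- ===== PRECONDITION & SPEC =====
-- Pre_f excludes the inputs start ≤ 0 < stop (with start ≠ stop), on which Python A recurses
-- forever through f(start*2), and the inputs with stop - start at or beyond Python's recursion
-- depth limit, where A's leftmost +1-recursion raises RecursionError before returning anything.
def Pre_f (start : Int) (stop : Int) (can_add_2 : Bool) : Prop :=
  (1 ≤ start ∨ stop ≤ start) ∧ stop - start < 5000
instance (start : Int) (stop : Int) (can_add_2 : Bool) : Decidable (Pre_f start stop can_add_2) := by unfold Pre_f; infer_instance
def pvWitness_f : Int × Int × Bool := (1, 6, true)

def Spec_f (start : Int) (stop : Int) (can_add_2 : Bool) (out : Int) : Prop := out = f_alt start stop can_add_2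
instance (start : Int) (stop : Int) (can_add_2 : Bool) (out : Int) : Decidable (Spec_f start stop can_add_2 out) := by unfold Spec_f; infer_instance

-- ===== CLAIM (what is proved, stated in full; the proofs are below) =====
def Claim_equal_f : Prop := ∀ (start : Int) (stop : Int) (can_add_2 : Bool), Dom_f start stop can_add_2 → Pre_f start stop can_add_2 → Spec_f start stop can_add_2 (f start stop can_add_2)

-- ===== LEMMAS AND PROOFS =====

-- fuel irrelevance for A's recursion, on the domain 1 ≤ s ∨ stop ≤ s
theorem fAux_irrel (stop : Int) : ∀ (m fuel1 fuel2 : Nat) (s : Int) (c : Bool),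
    (stop - s).toNat = m → (1 ≤ s ∨ stop ≤ s) → m < fuel1 → m < fuel2 →
    fAux fuel1 s stop c = fAux fuel2 s stop c := by
  intro m
  induction m using Nat.strong_induction_on with
  | _ m ih =>
    intro fuel1 fuel2 s c hm hdom h1 h2
    obtain ⟨a, rfl⟩ : ∃ a, fuel1 = a + 1 := ⟨fuel1 - 1, by omega⟩
    obtain ⟨b, rfl⟩ : ∃ b, fuel2 = b + 1 := ⟨fuel2 - 1, by omega⟩
    simp only [fAux]
    by_cases hgt : s > stop
    · simp [hgt]
    · by_cases heq : s = stop
      · simp [heq]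
      · have hlt : s < stop := by omega
        have hs1 : 1 ≤ s := by omega
        have e1 : fAux a (s + 1) stop true = fAux b (s + 1) stop true :=
          ih (stop - (s+1)).toNat (by omega) a b (s+1) true rfl (by omega) (by omega) (by omega)
        have e2 : fAux a (s * 2) stop true = fAux b (s * 2) stop true :=
          ih (stop - (s*2)).toNat (by omega) a b (s*2) true rfl (by omega) (by omega) (by omega)
        have e3 : fAux a (s + 2) stop false = fAux b (s + 2) stop false :=
          ih (stop - (s+2)).toNat (by omega) a b (s+2) false rfl (by omega) (by omega) (by omega)
        simp [hgt, heq, e1, e2, e3]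
theorem f_of_gt (start stop : Int) (c : Bool) (h : stop < start) : f start stop c = 0 := by
  simp [f, fAux, h]

theorem f_of_eq (s : Int) (c : Bool) : f s s c = 1 := by
  simp [f, fAux]

theorem f_rec (s stop : Int) (c : Bool) (h1 : 1 ≤ s) (h2 : s < stop) :
    f s stop c = f (s + 1) stop true + f (s * 2) stop true
      + (if c then f (s + 2) stop false else 0) := by
  have hm : (stop - s).toNat + 1 = ((stop - s).toNat - 1) + 1 + 1 := by omega
  rw [f, hm]
  conv_lhs => rw [fAux]
  have hgt : ¬ s > stop := by omega
  have heq : ¬ s = stop := by omega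
  have e1 : fAux ((stop - s).toNat - 1 + 1) (s + 1) stop true = f (s + 1) stop true :=
    fAux_irrel stop (stop - (s+1)).toNat _ _ (s+1) true rfl (by omega) (by omega) (by omega)
  have e2 : fAux ((stop - s).toNat - 1 + 1) (s * 2) stop true = f (s * 2) stop true :=
    fAux_irrel stop (stop - (s*2)).toNat _ _ (s*2) true rfl (by omega) (by omega) (by omega)
  have e3 : fAux ((stop - s).toNat - 1 + 1) (s + 2) stop false = f (s + 2) stop false :=
    fAux_irrel stop (stop - (s+2)).toNat _ _ (s+2) false rfl (by omega) (by omega) (by omega)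
  rw [if_neg hgt, if_neg heq]
  cases c
  · simp only [Bool.false_eq_true, if_false, List.sum_cons, List.sum_nil, e1, e2]
    omega
  · simp only [if_true, List.sum_append, List.sum_cons, List.sum_nil, e1, e2, e3]
    omega

-- the loop invariant: entries from index k up are the correct counts
def DPInv (start stop : Int) (n : Nat) (k : Nat) (st : List Int × List Int) : Prop :=
  st.1.length = n + 1 ∧ st.2.length = n + 1 ∧
  ∀ j : Nat, k ≤ j → j ≤ n → st.1.getD j 0 = f (start + j) stop true ∧
    st.2.getD j 0 = f (start + j) stop false

theorem bStep_inv (start stop : Int) (n k : Nat) (st : List Int × List Int)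
    (hs : 1 ≤ start) (hn : stop = start + n) (hk : k < n)
    (h : DPInv start stop n (k + 1) st) :
    DPInv start stop n k (bStep start n st (k : Int)) := by
  obtain ⟨hl1, hl2, hv⟩ := h
  have t1 : ((k : Int) + 1).toNat = k + 1 := by omega
  have t2 : ((k : Int) + 2).toNat = k + 2 := by omega
  have hDk : k + 1 ≤ (2 * (start + (k : Int)) - start).toNat := by omega
  have hbase : st.1.getD (k + 1) 0
      + (if 2 * (start + (k : Int)) - start ≤ (n : Int) then st.1.getD (2 * (start + (k : Int)) - start).toNat 0 else 0)
      = f (start + (k : Int)) stop false := by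
    have e1 : st.1.getD (k + 1) 0 = f (start + (k : Int) + 1) stop true := by
      rw [(hv (k + 1) le_rfl (by omega)).1]; congr 1; push_cast; ring
    have e2 : (if 2 * (start + (k : Int)) - start ≤ (n : Int)
          then st.1.getD (2 * (start + (k : Int)) - start).toNat 0 else 0)
        = f ((start + (k : Int)) * 2) stop true := by
      split_ifs with hle
      · rw [(hv _ hDk (by omega)).1]; congr 1; omega
      · exact (f_of_gt _ _ _ (by omega)).symm
    rw [e1, e2, f_rec (start + (k : Int)) stop false (by omega) (by omega)]
    simp
  have hext : (st.2.set k (f (start + (k : Int)) stop false)).getD (k + 2) 0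
      = (if (k : Int) + 2 ≤ (n : Int) then f (start + (k : Int) + 2) stop false else 0) := by
    rw [List.getD_eq_getElem?_getD, List.getElem?_set_ne (by omega), ← List.getD_eq_getElem?_getD]
    split_ifs with hle
    · rw [(hv (k + 2) (by omega) (by omega)).2]; congr 1; push_cast; ring
    · rw [List.getD_eq_getElem?_getD, List.getElem?_eq_none (by omega), Option.getD_none]
  have hb : bStep start n st (k : Int) =
      (st.1.set k (f (start + (k : Int)) stop true), st.2.set k (f (start + (k : Int)) stop false)) := by
    simp only [bStep, t1, t2, Int.toNat_natCast]
    rw [hbase, hext]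
    have hsum : f (start + (k : Int)) stop false
        + (if (k : Int) + 2 ≤ (n : Int)
            then (if (k : Int) + 2 ≤ (n : Int) then f (start + (k : Int) + 2) stop false else 0) else 0)
        = f (start + (k : Int)) stop true := by
      split_ifs with hle
      · rw [f_rec (start + (k : Int)) stop true (by omega) (by omega),
            f_rec (start + (k : Int)) stop false (by omega) (by omega)]
        simp
      · rw [f_rec (start + (k : Int)) stop true (by omega) (by omega),
            f_rec (start + (k : Int)) stop false (by omega) (by omega),
            f_of_gt (start + (k : Int) + 2) stop false (by omega)]
        simp
    rw [hsum]
  rw [hb]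
  refine ⟨by simpa using hl1, by simpa using hl2, ?_⟩
  intro j hkj hjn
  rcases eq_or_lt_of_le hkj with rfl | hlt
  · constructor <;>
      rw [List.getD_eq_getElem?_getD, List.getElem?_set_self (by omega), Option.getD_some]
  · have hne : k ≠ j := by omega
    refine ⟨?_, ?_⟩
    · rw [List.getD_eq_getElem?_getD, List.getElem?_set_ne hne, ← List.getD_eq_getElem?_getD]
      exact (hv j (by omega) hjn).1
    · rw [List.getD_eq_getElem?_getD, List.getElem?_set_ne hne, ← List.getD_eq_getElem?_getD]
      exact (hv j (by omega) hjn).2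

theorem loop_inv (start stop : Int) (n : Nat) (hs : 1 ≤ start) (hn : stop = start + n) :
    ∀ (k : Nat), k ≤ n → ∀ st, DPInv start stop n k st →
    DPInv start stop n 0 ((PySem.List.pyRange ((k : Int) - 1) (-1) (-1)).foldl (bStep start n) st) := by
  intro k
  induction k with
  | zero =>
    intro _ st h
    rw [PySem.List.pyRange_neg_one_eq_nil (by omega)]
    simpa using h
  | succ k ih =>
    intro hk st h
    have e : ((k + 1 : Nat) : Int) - 1 = (k : Int) := by push_cast; ring
    rw [e, PySem.List.pyRange_neg_one_cons (by omega), List.foldl_cons]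
    exact ih (by omega) _ (bStep_inv start stop n k st hs hn (by omega) h)

-- ===== VERDICT (by name: the statement is the Claim_ definition above) =====
theorem f_spec : Claim_equal_f := by
  unfold Claim_equal_f Spec_f
  intro start stop can _ hpre
  by_cases hgt : start > stop
  · rw [f_of_gt _ _ _ hgt]
    simp [f_alt, hgt]
  · rw [show f_alt start stop can =
        (let n : Nat := (stop - start).toNat
         let dpt := (List.replicate (n + 1) (0 : Int)).set n 1
         let dpf := (List.replicate (n + 1) (0 : Int)).set n 1
         let st := (PySem.List.pyRange ((n : Int) - 1) (-1) (-1)).foldl (bStep start n) (dpt, dpf)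
         if can then st.1.getD 0 0 else st.2.getD 0 0) from by rw [f_alt, if_neg hgt]]
    simp only []
    by_cases hn0 : (stop - start).toNat = 0
    · have hes : start = stop := by omega
      have e : (((stop - start).toNat : Int)) - 1 = -1 := by omega
      rw [e, PySem.List.pyRange_neg_one_eq_nil (by omega)]
      simp [hn0, hes, f_of_eq]
    · have hs1 : 1 ≤ start := by
        rcases hpre.1 with h1 | h1
        · exact h1
        · omega
      have hstop : stop = start + ((stop - start).toNat : Int) := by omega
      have hinit : DPInv start stop (stop - start).toNat (stop - start).toNat
          ((List.replicate ((stop - start).toNat + 1) 0).set (stop - start).toNat 1,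
           (List.replicate ((stop - start).toNat + 1) 0).set (stop - start).toNat 1) := by
        refine ⟨by simp, by simp, ?_⟩
        intro j hj1 hj2
        have : j = (stop - start).toNat := by omega
        subst this
        have hone : ((List.replicate ((stop - start).toNat + 1) (0 : Int)).set (stop - start).toNat 1).getD
            (stop - start).toNat 0 = 1 := by
          rw [List.getD_eq_getElem?_getD, List.getElem?_set_self (by simp), Option.getD_some]
        rw [hone]
        constructor <;> rw [show start + ((stop - start).toNat : Int) = stop by omega] <;>
          exact (f_of_eq stop _).symm
      have h0 := loop_inv start stop (stop - start).toNat hs1 hstop (stop - start).toNat le_rfl _ hinit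
      obtain ⟨-, -, hv⟩ := h0
      have h1 := hv 0 (Nat.zero_le _) (by omega)
      rw [show start + ((0 : Nat) : Int) = start by simp] at h1
      cases can
      · exact h1.2.symm
      · exact h1.1.symm
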